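-- pv_equiv track=rewrite | github.com/NVIDIA-NeMo/Nemotron | src/nemotron/kit/cli/evaluator.py | _parse_task_flags
-- ===== SOURCE A (Python) =====
-- def _parse_task_flags(passthrough: list[str]) -> list[str] | None:
--     """Parse -t/--task flags from passthrough args.
--
--     Args:
--         passthrough: List of passthrough arguments
--
--     Returns:
--         List of task names, or None if no tasks specified
--     """
--     tasks = []
--     i = 0
--     while i < len(passthrough):
--         if passthrough[i] in ("-t", "--task") and i + 1 < len(passthrough):
--             tasks.append(passthrough[i + 1])
--             i += 2
--         else:
--             i += 1
--     return tasks if tasks else None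
-- ===== SOURCE B (Python) =====
-- def _parse_task_flags(passthrough: list[str]) -> list[str] | None:
--     """Parse -t/--task flags by repeated earliest-flag search and list splitting.
--
--     Instead of walking an index, find the earliest occurrence of either flag
--     with list.index, take the element right after it, and continue on the
--     slice past that pair; stop when no flag remains or the flag is last.
--     """
--     tasks = []
--     rest = passthrough
--     while True:
--         hits = [rest.index(f) for f in ("-t", "--task") if f in rest]
--         if not hits:
--             break
--         j = min(hits)
--         if j + 1 >= len(rest):
--             break
--         tasks.append(rest[j + 1])
--         rest = rest[j + 2:]
--     return tasks if tasks else None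
-- ===== Notes on version B (the rewrite author's own statement) =====
-- stated objective: alternative
-- what changed: Replaced A's single index-walk with skip-by-2 arithmetic by a search-and-split loop: repeatedly locate the earliest flag via list.index/min, append the element after it, and restart on the slice past that pair.
import Mathlib
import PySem

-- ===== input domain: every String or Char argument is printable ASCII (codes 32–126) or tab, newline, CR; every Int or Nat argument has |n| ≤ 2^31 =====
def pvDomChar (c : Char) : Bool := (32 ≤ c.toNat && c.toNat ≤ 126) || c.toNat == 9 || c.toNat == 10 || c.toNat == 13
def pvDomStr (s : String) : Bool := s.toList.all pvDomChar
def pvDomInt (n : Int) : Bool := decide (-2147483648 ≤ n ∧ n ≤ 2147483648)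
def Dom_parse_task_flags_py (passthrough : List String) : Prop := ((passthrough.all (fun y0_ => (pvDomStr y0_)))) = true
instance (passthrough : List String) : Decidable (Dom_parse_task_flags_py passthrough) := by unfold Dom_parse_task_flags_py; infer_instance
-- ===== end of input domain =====

-- B replaces A's index-walk (skip-by-2 arithmetic) by a search-and-split loop:
-- find the earliest flag with list.index/min, take the next element, recurse on
-- the slice past the pair (membership/index/slice run as C-level scans).

-- ===== PORT A =====
-- A's while loop over index i, accumulating `tasks`.
def parseTaskGoA (p : List String) (i : Nat) (tasks : List String) : List String :=
  if _h : i < p.length then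
    if (p.getD i "" = "-t" ∨ p.getD i "" = "--task") ∧ i + 1 < p.length then
      parseTaskGoA p (i + 2) (tasks ++ [p.getD (i+1) ""])
    else
      parseTaskGoA p (i + 1) tasks
  else tasks
termination_by p.length - i

def parse_task_flags_py (passthrough : List String) : Option (List String) :=
  let tasks := parseTaskGoA passthrough 0 []
  if tasks = [] then none else some tasks

-- ===== PORT B =====
-- B's while-True loop: hits = [rest.index(f) for f in ("-t","--task") if f in rest];
-- j = min(hits); take rest[j+1] (in range, so getD is exact) and continue on
-- rest[j+2:] (nonnegative start, so it is List.drop).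
def parseTaskGoB (rest : List String) (tasks : List String) : List String :=
  let hits := ["-t", "--task"].foldl
    (fun acc f => if rest.contains f then acc ++ [(PySem.List.index? rest f).getD 0] else acc)
    ([] : List Nat)
  match PySem.List.min? hits (fun x => x) with
  | none => tasks
  | some j =>
    if _h : rest.length ≤ j + 1 then tasks
    else parseTaskGoB (rest.drop (j + 2)) (tasks ++ [rest.getD (j + 1) ""])
termination_by rest.length
decreasing_by simp; omega

def parse_task_flags_py_alt (passthrough : List String) : Option (List String) :=
  let tasks := parseTaskGoB passthrough []
  if tasks = [] then none else some tasks

-- ===== PRECONDITION & SPEC =====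
def Spec_parse_task_flags_py (passthrough : List String) (out : Option (List String)) : Prop := out = parse_task_flags_py_alt passthrough
instance (passthrough : List String) (out : Option (List String)) : Decidable (Spec_parse_task_flags_py passthrough out) := by unfold Spec_parse_task_flags_py; infer_instance

-- ===== CLAIM (what is proved, stated in full; the proofs are below) =====
def Claim_equal_parse_task_flags_py : Prop := ∀ (passthrough : List String), Dom_parse_task_flags_py passthrough → Spec_parse_task_flags_py passthrough (parse_task_flags_py passthrough)

-- ===== LEMMAS AND PROOFS =====

-- Proof-side reference function: structural one-pass collection of flag values.
def specGo : List String → List String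
  | [] => []
  | x :: rest =>
    if x = "-t" ∨ x = "--task" then
      match rest with
      | [] => []
      | y :: rest' => y :: specGo rest'
    else specGo rest

-- A's index loop from position i equals the accumulator plus specGo of the suffix.
theorem parseTaskGoA_eq_aux (p : List String) : ∀ (n i : Nat) (acc : List String),
    p.length - i ≤ n → parseTaskGoA p i acc = acc ++ specGo (p.drop i) := by
  intro n
  induction n with
  | zero =>
    intro i acc hn
    rw [parseTaskGoA]
    have h : ¬ i < p.length := by omega
    simp only [h, dif_neg, not_false_iff]
    rw [List.drop_eq_nil_of_le (by omega), specGo, List.append_nil]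
  | succ n ih =>
    intro i acc hn
    rw [parseTaskGoA]
    by_cases h : i < p.length
    · have hdrop : p.drop i = p[i] :: p.drop (i+1) := List.drop_eq_getElem_cons h
      have hget : p.getD i "" = p[i] := List.getD_eq_getElem p "" h
      simp only [h, dif_pos]
      by_cases hf : (p.getD i "" = "-t" ∨ p.getD i "" = "--task") ∧ i + 1 < p.length
      · rw [if_pos hf]
        have hdrop2 : p.drop (i+1) = p[i+1] :: p.drop (i+2) := by
          exact List.drop_eq_getElem_cons hf.2
        have hget2 : p.getD (i+1) "" = p[i+1] := List.getD_eq_getElem p "" hf.2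
        rw [ih (i+2) _ (by omega), hdrop, hdrop2, specGo]
        rw [if_pos (by rw [← hget]; exact hf.1)]
        simp [List.getD_eq_getElem?_getD, List.getElem?_eq_getElem hf.2]
      · rw [if_neg hf, ih (i+1) acc (by omega), hdrop]
        congr 1
        rcases Classical.em (p[i] = "-t" ∨ p[i] = "--task") with hfl | hfl
        · have hlen : ¬ i + 1 < p.length := fun hc => hf ⟨by rw [hget]; exact hfl, hc⟩
          have hnil : p.drop (i+1) = [] := List.drop_eq_nil_of_le (by omega)
          simp [hnil, specGo]
        · conv_rhs => rw [specGo.eq_def]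
          simp [hfl]
    · simp only [h, dif_neg, not_false_iff]
      rw [List.drop_eq_nil_of_le (by omega), specGo, List.append_nil]

-- specGo skips a flag-free prefix.
theorem specGo_skip : ∀ (rest : List String) (j : Nat), j ≤ rest.length →
    (∀ k (_hk : k < j) (h2 : k < rest.length), ¬ (rest[k] = "-t" ∨ rest[k] = "--task")) →
    specGo rest = specGo (rest.drop j) := by
  intro rest
  induction rest with
  | nil => intro j _ _; simp
  | cons x r ih =>
    intro j hj hfree
    cases j with
    | zero => simp
    | succ j =>
      have hx : ¬ (x = "-t" ∨ x = "--task") := by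
        have := hfree 0 (by omega) (by simp)
        simpa using this
      have hstep : specGo (x :: r) = specGo r := by
        conv_lhs => rw [specGo.eq_def]
        simp [hx]
      rw [hstep, List.drop_succ_cons]
      exact ih j (by simpa using hj) (fun k hk h2 => by
        have := hfree (k+1) (by omega) (by simpa using Nat.succ_lt_succ h2)
        simpa using this)

-- specGo of a flag-free list is empty.
theorem specGo_nil (rest : List String)
    (h : ∀ x ∈ rest, ¬ (x = "-t" ∨ x = "--task")) : specGo rest = [] := by
  induction rest with
  | nil => rfl
  | cons x r ih =>
    have hstep : specGo (x :: r) = specGo r := by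
      conv_lhs => rw [specGo.eq_def]
      simp [h x (by simp)]
    rw [hstep]
    exact ih (fun y hy => h y (by simp [hy]))

theorem parseTaskGoB_eq (n : Nat) : ∀ (rest tasks : List String), rest.length ≤ n →
    parseTaskGoB rest tasks = tasks ++ specGo rest := by
  induction n with
  | zero =>
    intro rest tasks hn
    have : rest = [] := List.eq_nil_of_length_eq_zero (by omega)
    subst this
    rw [parseTaskGoB]
    simp [PySem.List.min?, specGo, List.foldl]
  | succ n ih =>
    intro rest tasks hn
    rw [parseTaskGoB]
    by_cases h1 : rest.contains "-t" = true <;> by_cases h2 : rest.contains "--task" = true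
    all_goals simp only [List.foldl]
    -- case: both flags present
    · obtain ⟨i1, hi1⟩ := Option.isSome_iff_exists.mp
        ((PySem.List.index?_isSome_iff (xs := rest) (v := "-t")).mpr (by simpa using h1))
      obtain ⟨i2, hi2⟩ := Option.isSome_iff_exists.mp
        ((PySem.List.index?_isSome_iff (xs := rest) (v := "--task")).mpr (by simpa using h2))
      obtain ⟨hlt1, hget1, hmin1⟩ := PySem.List.getElem_of_index?_eq_some hi1
      obtain ⟨hlt2, hget2, hmin2⟩ := PySem.List.getElem_of_index?_eq_some hi2
      rw [if_pos h1, if_pos h2, hi1, hi2]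
      simp only [Option.getD_some, List.nil_append]
      have hm : PySem.List.min? ([i1] ++ [i2]) (fun x => x) = some (Nat.min i1 i2) := by
        simp [PySem.List.min?, Nat.min_def]; split_ifs <;> simp <;> omega
      rw [hm]
      set j := Nat.min i1 i2 with hjdef
      have hji1 : j ≤ i1 := Nat.min_le_left _ _
      have hji2 : j ≤ i2 := Nat.min_le_right _ _
      have hjlt : j < rest.length := by omega
      have hjflag : rest[j]'hjlt = "-t" ∨ rest[j]'hjlt = "--task" := by
        rcases Nat.le_total i1 i2 with hle | hle
        · left
          have he : j = i1 := by rw [hjdef]; exact Nat.min_eq_left hle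
          simp only [he]; exact hget1
        · right
          have he : j = i2 := by rw [hjdef]; exact Nat.min_eq_right hle
          simp only [he]; exact hget2
      have hfree : ∀ k (hk : k < j) (hk2 : k < rest.length),
          ¬ (rest[k] = "-t" ∨ rest[k] = "--task") := by
        intro k hk hk2 hc
        rcases hc with hc | hc
        · exact hmin1 k (by omega) hc
        · exact hmin2 k (by omega) hc
      have hspec : specGo rest = specGo (rest.drop j) :=
        specGo_skip rest j (by omega) hfree
      have hdropj : rest.drop j = rest[j] :: rest.drop (j+1) := List.drop_eq_getElem_cons hjlt
      by_cases hlast : rest.length ≤ j + 1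
      all_goals show (if _h : rest.length ≤ j + 1 then tasks
            else parseTaskGoB (rest.drop (j + 2)) (tasks ++ [rest.getD (j + 1) ""])) = tasks ++ specGo rest
      · rw [dif_pos hlast]
        have : rest.drop (j+1) = [] := List.drop_eq_nil_of_le hlast
        rw [hspec, hdropj, this, specGo, if_pos hjflag]
        simp
      · rw [dif_neg hlast]
        have hj1 : j + 1 < rest.length := by omega
        have hdropj1 : rest.drop (j+1) = rest[j+1] :: rest.drop (j+2) :=
          List.drop_eq_getElem_cons hj1
        rw [ih (rest.drop (j+2)) _ (by simp; omega)]
        rw [hspec, hdropj, hdropj1, specGo, if_pos hjflag]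
        rw [List.getD_eq_getElem rest "" hj1]
        simp
    -- only "-t"
    · obtain ⟨i1, hi1⟩ := Option.isSome_iff_exists.mp
        ((PySem.List.index?_isSome_iff (xs := rest) (v := "-t")).mpr (by simpa using h1))
      obtain ⟨hlt1, hget1, hmin1⟩ := PySem.List.getElem_of_index?_eq_some hi1
      have hno2 : "--task" ∉ rest := fun hc => h2 (by simpa using hc)
      rw [if_pos h1, if_neg h2, hi1]
      simp only [Option.getD_some, List.nil_append]
      have hm : PySem.List.min? [i1] (fun x => x) = some i1 := by
        simp [PySem.List.min?]
      rw [hm]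
      have hfree : ∀ k (hk : k < i1) (hk2 : k < rest.length),
          ¬ (rest[k] = "-t" ∨ rest[k] = "--task") := by
        intro k hk hk2 hc
        rcases hc with hc | hc
        · exact hmin1 k hk hc
        · exact hno2 (hc ▸ List.getElem_mem hk2)
      have hspec : specGo rest = specGo (rest.drop i1) :=
        specGo_skip rest i1 (by omega) hfree
      have hdropj : rest.drop i1 = rest[i1] :: rest.drop (i1+1) := List.drop_eq_getElem_cons hlt1
      by_cases hlast : rest.length ≤ i1 + 1
      all_goals show (if _h : rest.length ≤ i1 + 1 then tasks
            else parseTaskGoB (rest.drop (i1 + 2)) (tasks ++ [rest.getD (i1 + 1) ""])) = tasks ++ specGo rest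
      · rw [dif_pos hlast]
        have : rest.drop (i1+1) = [] := List.drop_eq_nil_of_le hlast
        rw [hspec, hdropj, this, specGo, if_pos (Or.inl hget1)]
        simp
      · rw [dif_neg hlast]
        have hj1 : i1 + 1 < rest.length := by omega
        have hdropj1 : rest.drop (i1+1) = rest[i1+1] :: rest.drop (i1+2) :=
          List.drop_eq_getElem_cons hj1
        rw [ih (rest.drop (i1+2)) _ (by simp; omega)]
        rw [hspec, hdropj, hdropj1, specGo, if_pos (Or.inl hget1)]
        rw [List.getD_eq_getElem rest "" hj1]
        simp
    -- only "--task"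
    · obtain ⟨i2, hi2⟩ := Option.isSome_iff_exists.mp
        ((PySem.List.index?_isSome_iff (xs := rest) (v := "--task")).mpr (by simpa using h2))
      obtain ⟨hlt2, hget2, hmin2⟩ := PySem.List.getElem_of_index?_eq_some hi2
      have hno1 : "-t" ∉ rest := fun hc => h1 (by simpa using hc)
      rw [if_neg h1, if_pos h2, hi2]
      simp only [Option.getD_some, List.nil_append]
      have hm : PySem.List.min? [i2] (fun x => x) = some i2 := by
        simp [PySem.List.min?]
      rw [hm]
      have hfree : ∀ k (hk : k < i2) (hk2 : k < rest.length),
          ¬ (rest[k] = "-t" ∨ rest[k] = "--task") := by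
        intro k hk hk2 hc
        rcases hc with hc | hc
        · exact hno1 (hc ▸ List.getElem_mem hk2)
        · exact hmin2 k hk hc
      have hspec : specGo rest = specGo (rest.drop i2) :=
        specGo_skip rest i2 (by omega) hfree
      have hdropj : rest.drop i2 = rest[i2] :: rest.drop (i2+1) := List.drop_eq_getElem_cons hlt2
      by_cases hlast : rest.length ≤ i2 + 1
      all_goals show (if _h : rest.length ≤ i2 + 1 then tasks
            else parseTaskGoB (rest.drop (i2 + 2)) (tasks ++ [rest.getD (i2 + 1) ""])) = tasks ++ specGo rest
      · rw [dif_pos hlast]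
        have : rest.drop (i2+1) = [] := List.drop_eq_nil_of_le hlast
        rw [hspec, hdropj, this, specGo, if_pos (Or.inr hget2)]
        simp
      · rw [dif_neg hlast]
        have hj1 : i2 + 1 < rest.length := by omega
        have hdropj1 : rest.drop (i2+1) = rest[i2+1] :: rest.drop (i2+2) :=
          List.drop_eq_getElem_cons hj1
        rw [ih (rest.drop (i2+2)) _ (by simp; omega)]
        rw [hspec, hdropj, hdropj1, specGo, if_pos (Or.inr hget2)]
        rw [List.getD_eq_getElem rest "" hj1]
        simp
    -- no flags
    · rw [if_neg h1, if_neg h2]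
      have hm : PySem.List.min? ([] : List Nat) (fun x => x) = none := by
        simp [PySem.List.min?]
      rw [hm]
      have hx1 : "-t" ∉ rest := fun hcc => h1 (by simpa using hcc)
      have hx2 : "--task" ∉ rest := fun hcc => h2 (by simpa using hcc)
      have : specGo rest = [] := specGo_nil rest (by
        intro x hx hc
        rcases hc with hc | hc
        · exact hx1 (hc ▸ hx)
        · exact hx2 (hc ▸ hx))
      rw [this, List.append_nil]

-- ===== VERDICT (by name: the statement is the Claim_ definition above) =====
theorem parse_task_flags_py_spec : Claim_equal_parse_task_flags_py := by
  intro p _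
  unfold Spec_parse_task_flags_py parse_task_flags_py parse_task_flags_py_alt
  rw [parseTaskGoA_eq_aux p p.length 0 [] (by omega),
      parseTaskGoB_eq p.length p [] (le_refl _)]
  simp
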